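-- pv_equiv track=rewrite | github.com/chenzongyao200127/leetcode_in_rust | src/928_尽量减少恶意软件的传播_II.py | minMalwareSpread
-- ===== SOURCE A (Python) =====
-- from collections import Counter
-- from typing import List
--
-- def minMalwareSpread(graph: List[List[int]], initial: List[int]) -> int:
--     st = set(initial)
--     vis = [False] * len(graph)
--
--     def dfs(x: int) -> int:
--         """ Perform DFS to find the size of the component and track the unique infected node if present. """
--         stack = [x]
--         local_size = 0
--         # -1 means no infected node found yet, -2 means multiple infected nodes
--         unique_infected = -1
--
--         while stack:
--             node = stack.pop()
--             if vis[node]: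
--                 continue
--             vis[node] = True
--             local_size += 1
--
--             for neighbor, connected in enumerate(graph[node]):
--                 if connected == 0:
--                     continue
--                 if neighbor in st:
--                     if unique_infected != -2:
--                         if unique_infected == -1:
--                             unique_infected = neighbor
--                         elif unique_infected != neighbor:
--                             unique_infected = -2
--                 elif not vis[neighbor]:
--                     stack.append(neighbor)
--
--         return local_size, unique_infected
--
--     cnt = Counter()
--     for i in range(len(graph)):
--         if not vis[i] and i not in st:
--             size, node_id = dfs(i)
--             if node_id >= 0:
--                 cnt[node_id] += size
--
--     # Use a min function with a tuple where we prioritize the largest negative size (smallest size) and then the smallest node_id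
--     if cnt:
--         return min((-size, node_id) for node_id, size in cnt.items())[1]
--     return min(initial)
-- ===== SOURCE B (Python) =====
-- from typing import List
--
-- def minMalwareSpread(graph: List[List[int]], initial: List[int]) -> int:
--     # Fixpoint-closure components instead of an explicit DFS stack: grow each
--     # clean component by repeated frontier expansion (at most n rounds), then
--     # collect the set of infected nodes touching it.
--     n = len(graph)
--     st = set(initial)
--     assigned = [False] * n
--     saved = {}
--     for i in range(n):
--         if i in st or assigned[i]:
--             continue
--         comp = {i}
--         for _ in range(n):  # each round adds at least one node, so n rounds suffice
--             new = {j for u in comp for j, c in enumerate(graph[u])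
--                    if c and j not in st and not assigned[j] and j not in comp}
--             if not new:
--                 break
--             comp |= new
--         for u in comp:
--             assigned[u] = True
--         touching = {j for u in comp for j, c in enumerate(graph[u]) if c and j in st}
--         if len(touching) == 1:
--             t = touching.pop()
--             saved[t] = saved.get(t, 0) + len(comp)
--     if saved:
--         return max(saved.items(), key=lambda kv: (kv[1], -kv[0]))[0]
--     return min(initial)
-- ===== Notes on version B (the rewrite author's own statement) =====
-- stated objective: alternative
-- what changed: Replaces A's explicit-stack DFS with mutated visited flags and an incremental unique-infected sentinel by a per-component set-valued fixpoint closure (repeated frontier expansion, at most n rounds) followed by a separate pass collecting the set of infected nodes touching the component; savings are aggregated in a dict and the winner picked by max over (size, -node) instead of min over (-size, node).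
import Mathlib
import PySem

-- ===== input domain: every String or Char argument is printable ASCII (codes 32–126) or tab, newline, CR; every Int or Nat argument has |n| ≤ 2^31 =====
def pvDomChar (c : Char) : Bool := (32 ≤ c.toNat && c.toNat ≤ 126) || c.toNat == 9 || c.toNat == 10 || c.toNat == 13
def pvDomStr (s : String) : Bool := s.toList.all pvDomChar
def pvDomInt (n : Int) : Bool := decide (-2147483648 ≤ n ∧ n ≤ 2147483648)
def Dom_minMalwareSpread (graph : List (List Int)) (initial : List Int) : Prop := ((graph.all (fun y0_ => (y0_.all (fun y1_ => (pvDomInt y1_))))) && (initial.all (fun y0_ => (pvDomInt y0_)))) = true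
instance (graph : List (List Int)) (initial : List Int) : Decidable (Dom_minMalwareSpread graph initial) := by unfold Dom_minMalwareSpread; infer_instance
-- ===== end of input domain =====

-- B re-implements A's stack-DFS component search as a bounded fixpoint-closure
-- (frontier-expansion) component computation: alternative algorithm, same values.

-- ===== PORT A =====
def uniqUpd (uniq : Int) (j : Int) : Int :=
  if uniq ≠ -2 then
    if uniq = -1 then j
    else if uniq ≠ j then -2 else uniq
  else uniq

def scanRow (initial : List Int) (vis : List Bool) (row : List Int) (j : Nat) (uniq : Int) :
    List Int × Int :=
  match row with
  | [] => ([], uniq)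
  | c :: rest =>
    if c = 0 then scanRow initial vis rest (j + 1) uniq
    else if (j : Int) ∈ initial then scanRow initial vis rest (j + 1) (uniqUpd uniq (j : Int))
    else if j < vis.length ∧ vis.getD j false = false then
      let r := scanRow initial vis rest (j + 1) uniq
      ((j : Int) :: r.1, r.2)
    else scanRow initial vis rest (j + 1) uniq

theorem count_false_set_lt (vis : List Bool) (k : Nat) (hk : k < vis.length)
    (hv : vis.getD k false = false) : (vis.set k true).count false < vis.count false := by
  induction vis generalizing k with
  | nil => simp at hk
  | cons a t ih =>
    cases k with
    | zero =>
      simp only [List.getD, List.getElem?_cons_zero, Option.getD_some] at hv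
      subst hv
      simp
    | succ k =>
      simp only [List.length_cons, Nat.succ_lt_succ_iff] at hk
      simp only [List.getD, List.getElem?_cons_succ] at hv
      have := ih k hk hv
      simp only [List.set_cons_succ, List.count_cons]
      omega

def dfsLoop (g : List (List Int)) (initial : List Int) :
    List Int → List Bool → Int → Int → List Bool × Int × Int
  | [], vis, size, uniq => (vis, size, uniq)
  | x :: rest, vis, size, uniq =>
    if h : 0 ≤ x ∧ x.toNat < vis.length then
      if vis.getD x.toNat false then dfsLoop g initial rest vis size uniq
      else
        match scanRow initial (vis.set x.toNat true) (g.getD x.toNat []) 0 uniq with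
        | (ps, uniq') =>
          dfsLoop g initial (ps.reverse ++ rest) (vis.set x.toNat true) (size + 1) uniq'
    else dfsLoop g initial rest vis size uniq
  termination_by stack vis _ _ => (vis.count false, stack.length)
  decreasing_by
  · exact Prod.Lex.right _ (Nat.lt_succ_self _)
  · exact Prod.Lex.left _ _ (count_false_set_lt _ _ h.2 (by simp_all))
  · exact Prod.Lex.right _ (Nat.lt_succ_self _)

def outerA (g : List (List Int)) (initial : List Int) : List Bool × PySem.Dict Int Int :=
  (PySem.List.pyRange 0 (g.length : Int) 1).foldl
    (fun s i =>
      if s.1.getD i.toNat false = false ∧ i ∉ initial then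
        match dfsLoop g initial [i] s.1 0 (-1) with
        | (vis', size, uniq) =>
          if uniq ≥ 0 then (vis', s.2.modify uniq 0 (· + size)) else (vis', s.2)
      else s)
    (List.replicate g.length false, PySem.Dict.empty)

def minMalwareSpread (graph : List (List Int)) (initial : List Int) : Int :=
  let s := outerA graph initial
  match s.2.items.map (fun kv => (-kv.2, kv.1)) with
  | [] => (PySem.List.min? initial (fun x => x)).getD 0
  | p :: rest =>
      (rest.foldl (fun b q => if q.1 < b.1 ∨ (q.1 = b.1 ∧ q.2 < b.2) then q else b) p).2

-- ===== PORT B =====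
def newRow (initial : List Int) (assigned : List Bool) (comp : List Int)
    (row : List Int) (j : Nat) (acc : List Int) : List Int :=
  match row with
  | [] => acc
  | c :: rest =>
    if c ≠ 0 ∧ (j : Int) ∉ initial ∧ j < assigned.length ∧ assigned.getD j false = false ∧
        (j : Int) ∉ comp then
      newRow initial assigned comp rest (j + 1) (PySem.Set.add acc (j : Int))
    else newRow initial assigned comp rest (j + 1) acc

def stepNew (g : List (List Int)) (initial : List Int) (assigned : List Bool)
    (comp : List Int) : List Int :=
  comp.foldl (fun acc u => newRow initial assigned comp (g.getD u.toNat []) 0 acc) []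

def closureLoop (g : List (List Int)) (initial : List Int) (assigned : List Bool) :
    Nat → List Int → List Int
  | 0, comp => comp
  | fuel + 1, comp =>
    let nw := stepNew g initial assigned comp
    if nw = [] then comp else closureLoop g initial assigned fuel (PySem.Set.union comp nw)

def touchRow (initial : List Int) (row : List Int) (j : Nat) (acc : List Int) : List Int :=
  match row with
  | [] => acc
  | c :: rest =>
    if c ≠ 0 ∧ (j : Int) ∈ initial then touchRow initial rest (j + 1) (PySem.Set.add acc (j : Int))
    else touchRow initial rest (j + 1) acc

def touchOf (g : List (List Int)) (initial : List Int) (comp : List Int) : List Int :=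
  comp.foldl (fun acc u => touchRow initial (g.getD u.toNat []) 0 acc) []

def assignComp (assigned : List Bool) (comp : List Int) : List Bool :=
  comp.foldl (fun a u => a.set u.toNat true) assigned

def outerB (g : List (List Int)) (initial : List Int) : List Bool × PySem.Dict Int Int :=
  (PySem.List.pyRange 0 (g.length : Int) 1).foldl
    (fun s i =>
      if i ∈ initial ∨ s.1.getD i.toNat false then s
      else
        let comp := closureLoop g initial s.1 g.length [i]
        let saved :=
          match touchOf g initial comp with
          | [t] => s.2.insert t (s.2.getD t 0 + (comp.length : Int))
          | _ => s.2
        (assignComp s.1 comp, saved))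
    (List.replicate g.length false, PySem.Dict.empty)

def minMalwareSpread_alt (graph : List (List Int)) (initial : List Int) : Int :=
  let s := outerB graph initial
  match s.2.items with
  | [] => (PySem.List.min? initial (fun x => x)).getD 0
  | p :: rest =>
      (rest.foldl (fun b q => if b.2 < q.2 ∨ (b.2 = q.2 ∧ q.1 < b.1) then q else b) p).1


-- ===== PRECONDITION & SPEC =====
-- Pre_ is exactly the set of inputs on which the Python A returns normally: A raises
-- ValueError when `initial` is empty (min of an empty sequence), and IndexError when some
-- row of an uninfected node (every such row gets scanned) has a nonzero entry at a column
-- index ≥ len(graph) that is not an infected node (vis[neighbor] is out of range there).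
def Pre_minMalwareSpread (graph : List (List Int)) (initial : List Int) : Prop :=
  initial ≠ [] ∧
  ∀ i < graph.length, (i : Int) ∉ initial →
    ∀ j < (graph.getD i []).length, graph.length ≤ j →
      (graph.getD i []).getD j 0 ≠ 0 → (j : Int) ∈ initial
instance (graph : List (List Int)) (initial : List Int) :
    Decidable (Pre_minMalwareSpread graph initial) := by
  unfold Pre_minMalwareSpread
  exact @instDecidableAnd _ _ (by infer_instance) (Nat.decidableBallLT _ _)

def pvWitness_minMalwareSpread : List (List Int) × List Int :=
  ([[1, 1, 0], [1, 1, 0], [0, 0, 1]], [0, 1])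

def Spec_minMalwareSpread (graph : List (List Int)) (initial : List Int) (out : Int) : Prop := out = minMalwareSpread_alt graph initial
instance (graph : List (List Int)) (initial : List Int) (out : Int) : Decidable (Spec_minMalwareSpread graph initial out) := by unfold Spec_minMalwareSpread; infer_instance

-- ===== CLAIM (what is proved, stated in full; the proofs are below) =====
def Claim_equal_minMalwareSpread : Prop := ∀ (graph : List (List Int)) (initial : List Int), Dom_minMalwareSpread graph initial → Pre_minMalwareSpread graph initial → Spec_minMalwareSpread graph initial (minMalwareSpread graph initial)

-- ===== LEMMAS AND PROOFS =====
-- ---------- proof-side helpers ----------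
def rowInf (initial : List Int) (row : List Int) (j : Nat) : List Int :=
  match row with
  | [] => []
  | c :: rest =>
    if c = 0 then rowInf initial rest (j + 1)
    else if (j : Int) ∈ initial then (j : Int) :: rowInf initial rest (j + 1)
    else rowInf initial rest (j + 1)

def uniqList (uniq : Int) (E : List Int) : Int := E.foldl uniqUpd uniq

-- ---------- scanRow lemmas ----------
theorem scanRow_snd (initial : List Int) (vis : List Bool) (row : List Int) (j : Nat)
    (uniq : Int) : (scanRow initial vis row j uniq).2 = uniqList uniq (rowInf initial row j) := by
  induction row generalizing j uniq with
  | nil => rfl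
  | cons c rest ih =>
    simp only [scanRow, rowInf]
    split_ifs with h1 h2 h3
    · exact ih _ _
    · simpa [uniqList] using ih _ _
    · simpa using ih _ _
    · exact ih _ _

theorem mem_rowInf (initial : List Int) (row : List Int) (j : Nat) (t : Int) :
    t ∈ rowInf initial row j ↔
      ∃ k, j ≤ k ∧ k < j + row.length ∧ row.getD (k - j) 0 ≠ 0 ∧ (k : Int) ∈ initial ∧
        t = (k : Int) := by
  induction row generalizing j with
  | nil => simp [rowInf]
  | cons c rest ih =>
    simp only [rowInf]
    have tail : ∀ k, j + 1 ≤ k → (c :: rest).getD (k - j) 0 = rest.getD (k - (j + 1)) 0 := by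
      intro k hk
      have : k - j = (k - (j + 1)) + 1 := by omega
      rw [this]; rfl
    split_ifs with h1 h2
    · rw [ih]
      constructor
      · rintro ⟨k, hk1, hk2, hk3, hk4, hk5⟩
        refine ⟨k, by omega, by simp; omega, ?_, hk4, hk5⟩
        rw [tail k hk1]; exact hk3
      · rintro ⟨k, hk1, hk2, hk3, hk4, hk5⟩
        have hkj : j + 1 ≤ k := by
          rcases Nat.eq_or_lt_of_le hk1 with h | h
          · exfalso; subst h; simp at hk3; exact hk3 h1
          · omega
        exact ⟨k, hkj, by simp at hk2; omega, by rw [tail k hkj] at hk3; exact hk3, hk4, hk5⟩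
    · simp only [List.mem_cons, ih]
      constructor
      · rintro (ht | ⟨k, hk1, hk2, hk3, hk4, hk5⟩)
        · exact ⟨j, le_refl _, by simp, by simpa using h1, h2, ht⟩
        · refine ⟨k, by omega, by simp; omega, ?_, hk4, hk5⟩
          rw [tail k hk1]; exact hk3
      · rintro ⟨k, hk1, hk2, hk3, hk4, hk5⟩
        rcases Nat.eq_or_lt_of_le hk1 with h | h
        · left; rw [hk5, h]
        · right
          exact ⟨k, by omega, by simp at hk2; omega,
            by rw [tail k (by omega)] at hk3; exact hk3, hk4, hk5⟩
    · rw [ih]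
      constructor
      · rintro ⟨k, hk1, hk2, hk3, hk4, hk5⟩
        refine ⟨k, by omega, by simp; omega, ?_, hk4, hk5⟩
        rw [tail k hk1]; exact hk3
      · rintro ⟨k, hk1, hk2, hk3, hk4, hk5⟩
        rcases Nat.eq_or_lt_of_le hk1 with h | h
        · exfalso; subst h; exact h2 hk4
        · exact ⟨k, by omega, by simp at hk2; omega,
            by rw [tail k (by omega)] at hk3; exact hk3, hk4, hk5⟩

theorem mem_scanRow_fst (initial : List Int) (vis : List Bool) (row : List Int) (j : Nat)
    (uniq : Int) (x : Int) :
    x ∈ (scanRow initial vis row j uniq).1 ↔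
      ∃ k, j ≤ k ∧ k < j + row.length ∧ row.getD (k - j) 0 ≠ 0 ∧ (k : Int) ∉ initial ∧
        k < vis.length ∧ vis.getD k false = false ∧ x = (k : Int) := by
  induction row generalizing j uniq with
  | nil => simp [scanRow]
  | cons c rest ih =>
    simp only [scanRow]
    have tail : ∀ k, j + 1 ≤ k → (c :: rest).getD (k - j) 0 = rest.getD (k - (j + 1)) 0 := by
      intro k hk
      have : k - j = (k - (j + 1)) + 1 := by omega
      rw [this]; rfl
    have step : ∀ (u : Int),
        (x ∈ (scanRow initial vis rest (j + 1) u).1 ↔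
          ∃ k, j + 1 ≤ k ∧ k < j + 1 + rest.length ∧ rest.getD (k - (j + 1)) 0 ≠ 0 ∧
            (k : Int) ∉ initial ∧ k < vis.length ∧ vis.getD k false = false ∧ x = (k : Int)) :=
      fun u => ih (j + 1) u
    split_ifs with h1 h2 h3
    · rw [step]
      constructor
      · rintro ⟨k, hk1, hk2, hk3, hk4, hk5, hk6, hk7⟩
        refine ⟨k, by omega, by simp; omega, ?_, hk4, hk5, hk6, hk7⟩
        rw [tail k hk1]; exact hk3
      · rintro ⟨k, hk1, hk2, hk3, hk4, hk5, hk6, hk7⟩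
        have hkj : j + 1 ≤ k := by
          rcases Nat.eq_or_lt_of_le hk1 with h | h
          · exfalso; subst h; simp at hk3; exact hk3 h1
          · omega
        exact ⟨k, hkj, by simp at hk2; omega, by rw [tail k hkj] at hk3; exact hk3,
          hk4, hk5, hk6, hk7⟩
    · rw [step]
      constructor
      · rintro ⟨k, hk1, hk2, hk3, hk4, hk5, hk6, hk7⟩
        refine ⟨k, by omega, by simp; omega, ?_, hk4, hk5, hk6, hk7⟩
        rw [tail k hk1]; exact hk3
      · rintro ⟨k, hk1, hk2, hk3, hk4, hk5, hk6, hk7⟩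
        rcases Nat.eq_or_lt_of_le hk1 with h | h
        · exfalso; subst h; exact hk4 h2
        · exact ⟨k, by omega, by simp at hk2; omega,
            by rw [tail k (by omega)] at hk3; exact hk3, hk4, hk5, hk6, hk7⟩
    · simp only [List.mem_cons, step]
      constructor
      · rintro (hx | ⟨k, hk1, hk2, hk3, hk4, hk5, hk6, hk7⟩)
        · exact ⟨j, le_refl _, by simp, by simpa using h1, h2, h3.1, h3.2, hx⟩
        · refine ⟨k, by omega, by simp; omega, ?_, hk4, hk5, hk6, hk7⟩
          rw [tail k hk1]; exact hk3
      · rintro ⟨k, hk1, hk2, hk3, hk4, hk5, hk6, hk7⟩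
        rcases Nat.eq_or_lt_of_le hk1 with h | h
        · left; rw [hk7, h]
        · right
          exact ⟨k, by omega, by simp at hk2; omega,
            by rw [tail k (by omega)] at hk3; exact hk3, hk4, hk5, hk6, hk7⟩
    · rw [step]
      rw [Classical.not_and_iff_not_or_not] at h3
      constructor
      · rintro ⟨k, hk1, hk2, hk3, hk4, hk5, hk6, hk7⟩
        refine ⟨k, by omega, by simp; omega, ?_, hk4, hk5, hk6, hk7⟩
        rw [tail k hk1]; exact hk3
      · rintro ⟨k, hk1, hk2, hk3, hk4, hk5, hk6, hk7⟩
        rcases Nat.eq_or_lt_of_le hk1 with h | h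
        · exfalso; subst h
          rcases h3 with h' | h'
          · exact h' hk5
          · exact h' hk6
        · exact ⟨k, by omega, by simp at hk2; omega,
            by rw [tail k (by omega)] at hk3; exact hk3, hk4, hk5, hk6, hk7⟩

-- ---------- uniqList classification ----------
theorem uniqList_append (u : Int) (E F : List Int) :
    uniqList u (E ++ F) = uniqList (uniqList u E) F := by
  simp [uniqList, List.foldl_append]

theorem uniqUpd_self (t : Int) (ht : 0 ≤ t) : uniqUpd t t = t := by
  simp only [uniqUpd]
  split_ifs with h1 h2 h3 <;> omega

theorem uniqUpd_start (x : Int) : uniqUpd (-1) x = x := by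
  simp [uniqUpd]

theorem uniqUpd_other (t x : Int) (ht : 0 ≤ t) (hx : x ≠ t) : uniqUpd t x = -2 := by
  simp only [uniqUpd]
  split_ifs with h1 h2 h3 <;> omega

theorem uniqList_neg_two (E : List Int) : uniqList (-2) E = -2 := by
  induction E with
  | nil => rfl
  | cons a rest ih => simpa [uniqList, uniqUpd] using ih

theorem uniqList_const (t : Int) (ht : 0 ≤ t) (E : List Int) (hE : ∀ x ∈ E, x = t) :
    uniqList t E = t := by
  induction E with
  | nil => rfl
  | cons a rest ih =>
    have ha : a = t := hE a (by simp)
    simp only [uniqList, List.foldl_cons, ha, uniqUpd_self t ht]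
    exact ih fun x hx => hE x (by simp [hx])

theorem uniqList_single (t : Int) (ht : 0 ≤ t) (E : List Int) (hne : E ≠ [])
    (hE : ∀ x ∈ E, x = t) : uniqList (-1) E = t := by
  cases E with
  | nil => exact absurd rfl hne
  | cons a rest =>
    have ha : a = t := hE a (by simp)
    simp only [uniqList, List.foldl_cons, uniqUpd_start, ha]
    exact uniqList_const t ht rest fun x hx => hE x (by simp [hx])

theorem uniqList_two_distinct_aux (E : List Int) (a : Int) (ha : 0 ≤ a)
    (h : ∃ b ∈ E, b ≠ a) : uniqList a E = -2 := by
  induction E with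
  | nil => simp at h
  | cons x rest ih =>
    rcases h with ⟨b, hb, hba⟩
    by_cases hxa : x = a
    · subst hxa
      simp only [uniqList, List.foldl_cons, uniqUpd_self x ha]
      refine ih ⟨b, ?_, hba⟩
      rcases List.mem_cons.mp hb with h | h
      · exact absurd h hba
      · exact h
    · simp only [uniqList, List.foldl_cons, uniqUpd_other a x ha hxa]
      exact uniqList_neg_two rest

theorem uniqList_two_distinct (E : List Int) (hpos : ∀ x ∈ E, 0 ≤ x)
    (h : ∃ a ∈ E, ∃ b ∈ E, a ≠ b) : uniqList (-1) E = -2 := by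
  cases E with
  | nil => simp at h
  | cons x rest =>
    simp only [uniqList, List.foldl_cons, uniqUpd_start]
    rcases h with ⟨a, hA, b, hB, hab⟩
    have hx : 0 ≤ x := hpos x (by simp)
    refine uniqList_two_distinct_aux rest x hx ?_
    by_cases hax : a = x
    · subst hax
      have hbx : b ≠ a := fun hh => hab hh.symm
      refine ⟨b, ?_, hbx⟩
      rcases List.mem_cons.mp hB with h | h
      · exact absurd h hbx
      · exact h
    · refine ⟨a, ?_, hax⟩
      rcases List.mem_cons.mp hA with h | h
      · exact absurd h hax
      · exact h


-- ---------- dfsLoop equations ----------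
theorem dfsLoop_nil (g : List (List Int)) (initial : List Int) (vis : List Bool)
    (size uniq : Int) : dfsLoop g initial [] vis size uniq = (vis, size, uniq) := by
  rw [dfsLoop]

theorem dfsLoop_oor (g : List (List Int)) (initial : List Int) (x : Int) (rest : List Int)
    (vis : List Bool) (size uniq : Int) (h : ¬(0 ≤ x ∧ x.toNat < vis.length)) :
    dfsLoop g initial (x :: rest) vis size uniq = dfsLoop g initial rest vis size uniq := by
  rw [dfsLoop]; simp [h]

theorem dfsLoop_seen (g : List (List Int)) (initial : List Int) (x : Int) (rest : List Int)
    (vis : List Bool) (size uniq : Int) (h : 0 ≤ x ∧ x.toNat < vis.length)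
    (hv : vis.getD x.toNat false = true) :
    dfsLoop g initial (x :: rest) vis size uniq = dfsLoop g initial rest vis size uniq := by
  rw [dfsLoop]; simp only [dif_pos h, hv, if_true]

theorem dfsLoop_new (g : List (List Int)) (initial : List Int) (x : Int) (rest : List Int)
    (vis : List Bool) (size uniq : Int) (h : 0 ≤ x ∧ x.toNat < vis.length)
    (hv : ¬vis.getD x.toNat false = true) (ps : List Int) (uniq' : Int)
    (hscan : scanRow initial (vis.set x.toNat true) (g.getD x.toNat []) 0 uniq = (ps, uniq')) :
    dfsLoop g initial (x :: rest) vis size uniq =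
      dfsLoop g initial (ps.reverse ++ rest) (vis.set x.toNat true) (size + 1) uniq' := by
  rw [dfsLoop]; simp only [dif_pos h, hv, Bool.false_eq_true, if_false, hscan]

theorem getD_set_self (vis : List Bool) (k : Nat) (hk : k < vis.length) :
    (vis.set k true).getD k false = true := by
  simp [List.getD, hk]

theorem getD_set_ne (vis : List Bool) (k j : Nat) (hj : j ≠ k) :
    (vis.set k true).getD j false = vis.getD j false := by
  simp [List.getD, List.getElem?_set_ne (by omega : k ≠ j)]

-- ---------- dfsLoop invariants ----------
theorem dfs_len (g : List (List Int)) (initial : List Int) (stack : List Int)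
    (vis : List Bool) (size uniq : Int) :
    (dfsLoop g initial stack vis size uniq).1.length = vis.length := by
  induction stack, vis, size, uniq using dfsLoop.induct g initial with
  | case1 vis size uniq => rw [dfsLoop_nil]
  | case2 x rest vis size uniq h hv ih => rwa [dfsLoop_seen g initial x rest vis size uniq h hv]
  | case3 x rest vis size uniq h hv ps uniq' hscan ih =>
    rw [dfsLoop_new g initial x rest vis size uniq h hv ps uniq' hscan]
    simpa using ih
  | case4 x rest vis size uniq h ih => rwa [dfsLoop_oor g initial x rest vis size uniq h]

theorem dfs_mono (g : List (List Int)) (initial : List Int) (stack : List Int)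
    (vis : List Bool) (size uniq : Int) :
    ∀ j, vis.getD j false = true →
      (dfsLoop g initial stack vis size uniq).1.getD j false = true := by
  induction stack, vis, size, uniq using dfsLoop.induct g initial with
  | case1 vis size uniq => intro j hj; rwa [dfsLoop_nil]
  | case2 x rest vis size uniq h hv ih =>
    intro j hj; rw [dfsLoop_seen g initial x rest vis size uniq h hv]; exact ih j hj
  | case3 x rest vis size uniq h hv ps uniq' hscan ih =>
    intro j hj
    rw [dfsLoop_new g initial x rest vis size uniq h hv ps uniq' hscan]
    refine ih j ?_
    by_cases hjx : j = x.toNat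
    · subst hjx; exact getD_set_self vis _ h.2
    · rw [getD_set_ne vis _ _ hjx]; exact hj
  | case4 x rest vis size uniq h ih =>
    intro j hj; rw [dfsLoop_oor g initial x rest vis size uniq h]; exact ih j hj

theorem dfs_stack (g : List (List Int)) (initial : List Int) (stack : List Int)
    (vis : List Bool) (size uniq : Int) :
    ∀ x ∈ stack, 0 ≤ x → x.toNat < vis.length →
      (dfsLoop g initial stack vis size uniq).1.getD x.toNat false = true := by
  induction stack, vis, size, uniq using dfsLoop.induct g initial with
  | case1 vis size uniq => intro x hx; simp at hx
  | case2 x rest vis size uniq h hv ih =>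
    intro y hy hy0 hylen
    rw [dfsLoop_seen g initial x rest vis size uniq h hv]
    rcases List.mem_cons.mp hy with rfl | hyr
    · exact dfs_mono g initial rest vis size uniq _ hv
    · exact ih y hyr hy0 hylen
  | case3 x rest vis size uniq h hv ps uniq' hscan ih =>
    intro y hy hy0 hylen
    rw [dfsLoop_new g initial x rest vis size uniq h hv ps uniq' hscan]
    rcases List.mem_cons.mp hy with rfl | hyr
    · exact dfs_mono g initial _ _ _ _ _ (getD_set_self vis _ h.2)
    · exact ih y (by simp [hyr]) hy0 (by simpa using hylen)
  | case4 x rest vis size uniq h ih =>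
    intro y hy hy0 hylen
    rw [dfsLoop_oor g initial x rest vis size uniq h]
    rcases List.mem_cons.mp hy with rfl | hyr
    · exact absurd ⟨hy0, hylen⟩ h
    · exact ih y hyr hy0 hylen

theorem dfs_closed (g : List (List Int)) (initial : List Int) (stack : List Int)
    (vis : List Bool) (size uniq : Int) :
    ∀ u j, vis.getD u false = false →
      (dfsLoop g initial stack vis size uniq).1.getD u false = true →
      j < (g.getD u []).length → (g.getD u []).getD j 0 ≠ 0 → (j : Int) ∉ initial →
      j < vis.length →
      (dfsLoop g initial stack vis size uniq).1.getD j false = true := by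
  induction stack, vis, size, uniq using dfsLoop.induct g initial with
  | case1 vis size uniq =>
    intro u j hu hru
    exfalso
    rw [dfsLoop_nil] at hru
    have h2 : vis.getD u false = true := hru
    rw [h2] at hu
    exact Bool.noConfusion hu
  | case2 x rest vis size uniq h hv ih =>
    intro u j hu hru hj1 hj2 hj3 hj4
    rw [dfsLoop_seen g initial x rest vis size uniq h hv] at hru ⊢
    exact ih u j hu hru hj1 hj2 hj3 hj4
  | case3 x rest vis size uniq h hv ps uniq' hscan ih =>
    intro u j hu hru hj1 hj2 hj3 hj4
    rw [dfsLoop_new g initial x rest vis size uniq h hv ps uniq' hscan] at hru ⊢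
    by_cases hux : u = x.toNat
    · subst hux
      by_cases hjv : (vis.set x.toNat true).getD j false = true
      · exact dfs_mono g initial _ _ _ _ j hjv
      · have hjmem : (j : Int) ∈ ps := by
          have := (mem_scanRow_fst initial (vis.set x.toNat true) (g.getD x.toNat []) 0 uniq (j : Int))
          rw [hscan] at this
          refine this.mpr ⟨j, Nat.zero_le _, by simpa using hj1, by simpa using hj2, hj3,
            by simpa using hj4, by simpa using hjv, rfl⟩
        refine dfs_stack g initial _ _ _ _ (j : Int) (by simp [hjmem]) (by positivity) ?_
        simpa using hj4
    · have hu' : (vis.set x.toNat true).getD u false = false := by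
        rw [getD_set_ne vis _ _ hux]; exact hu
      exact ih u j hu' hru hj1 hj2 hj3 (by simpa using hj4)
  | case4 x rest vis size uniq h ih =>
    intro u j hu hru hj1 hj2 hj3 hj4
    rw [dfsLoop_oor g initial x rest vis size uniq h] at hru ⊢
    exact ih u j hu hru hj1 hj2 hj3 hj4

theorem dfs_sound (g : List (List Int)) (initial : List Int) (stack : List Int)
    (vis : List Bool) (size uniq : Int) (C : Nat → Prop) (V0 : Nat → Prop) :
    (∀ u j, C u → j < (g.getD u []).length → (g.getD u []).getD j 0 ≠ 0 →
      (j : Int) ∉ initial → j < vis.length → ¬ V0 j → C j) →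
    (∀ j, vis.getD j false = true → V0 j ∨ C j) →
    (∀ j, V0 j → vis.getD j false = true) →
    (∀ x ∈ stack, 0 ≤ x ∧ C x.toNat) →
    ∀ j, (dfsLoop g initial stack vis size uniq).1.getD j false = true → V0 j ∨ C j := by
  induction stack, vis, size, uniq using dfsLoop.induct g initial with
  | case1 vis size uniq =>
    intro hC hv hv0 hs j hj
    rw [dfsLoop_nil] at hj
    exact hv j hj
  | case2 x rest vis size uniq h hv' ih =>
    intro hC hv hv0 hs j hj
    rw [dfsLoop_seen g initial x rest vis size uniq h hv'] at hj
    exact ih hC hv hv0 (fun y hy => hs y (by simp [hy])) j hj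
  | case3 x rest vis size uniq h hv' ps uniq' hscan ih =>
    intro hC hv hv0 hs j hj
    rw [dfsLoop_new g initial x rest vis size uniq h hv' ps uniq' hscan] at hj
    have hCx : C x.toNat := (hs x (by simp)).2
    refine ih ?_ ?_ ?_ ?_ j hj
    · intro u j' hCu h1 h2 h3 h4 h5
      exact hC u j' hCu h1 h2 h3 (by simpa using h4) h5
    · intro j' hj'
      by_cases hjx : j' = x.toNat
      · subst hjx; exact Or.inr hCx
      · rw [getD_set_ne vis _ _ hjx] at hj'; exact hv j' hj'
    · intro j' hj'
      have := hv0 j' hj'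
      by_cases hjx : j' = x.toNat
      · subst hjx; exact getD_set_self vis _ h.2
      · rw [getD_set_ne vis _ _ hjx]; exact this
    · intro y hy
      rcases List.mem_append.mp (by simpa using hy) with hyp | hyr
      · have := (mem_scanRow_fst initial (vis.set x.toNat true) (g.getD x.toNat []) 0 uniq y)
        rw [hscan] at this
        rcases this.mp (by simpa using hyp) with ⟨k, _, hk2, hk3, hk4, hk5, hk6, hk7⟩
        have hkC : C k := by
          refine hC x.toNat k hCx (by simpa using hk2) (by simpa using hk3) hk4
            (by simpa using hk5) ?_
          intro hV0
          have := hv0 k hV0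
          by_cases hkx : k = x.toNat
          · subst hkx
            rw [getD_set_self vis _ h.2] at hk6; exact absurd hk6 (by simp)
          · rw [getD_set_ne vis _ _ hkx] at hk6; rw [hk6] at this; exact absurd this (by simp)
        subst hk7
        exact ⟨by positivity, by simpa using hkC⟩
      · exact hs y (by simp [hyr])
  | case4 x rest vis size uniq h ih =>
    intro hC hv hv0 hs j hj
    rw [dfsLoop_oor g initial x rest vis size uniq h] at hj
    exact ih hC hv hv0 (fun y hy => hs y (by simp [hy])) j hj

theorem dfs_size (g : List (List Int)) (initial : List Int) (stack : List Int)
    (vis : List Bool) (size uniq : Int) :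
    (dfsLoop g initial stack vis size uniq).2.1 = size +
      (((Finset.range vis.length).filter (fun j =>
        (dfsLoop g initial stack vis size uniq).1.getD j false = true ∧
          vis.getD j false = false)).card : Int) := by
  induction stack, vis, size, uniq using dfsLoop.induct g initial with
  | case1 vis size uniq =>
    rw [dfsLoop_nil]
    have : ((Finset.range vis.length).filter (fun j =>
        (vis, size, uniq).1.getD j false = true ∧ vis.getD j false = false)) = ∅ := by
      ext j
      simp only [Finset.mem_filter, Finset.mem_range, Finset.notMem_empty, iff_false]
      rintro ⟨_, h1, h2⟩
      rw [h1] at h2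
      exact Bool.noConfusion h2
    rw [this]
    simp
  | case2 x rest vis size uniq h hv ih =>
    rw [dfsLoop_seen g initial x rest vis size uniq h hv]
    exact ih
  | case3 x rest vis size uniq h hv ps uniq' hscan ih =>
    rw [dfsLoop_new g initial x rest vis size uniq h hv ps uniq' hscan]
    rw [ih]
    have hvfalse : vis.getD x.toNat false = false := by
      cases hvv : vis.getD x.toNat false
      · rfl
      · exact absurd hvv hv
    set rF := (dfsLoop g initial (ps.reverse ++ rest) (vis.set x.toNat true) (size + 1) uniq').1
      with hrF
    have hlen : (vis.set x.toNat true).length = vis.length := by simp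
    have hSx : rF.getD x.toNat false = true :=
      dfs_mono g initial _ _ _ _ x.toNat (getD_set_self vis _ h.2)
    have hset : ((Finset.range vis.length).filter (fun j =>
          rF.getD j false = true ∧ vis.getD j false = false)) =
        insert x.toNat ((Finset.range (vis.set x.toNat true).length).filter (fun j =>
          rF.getD j false = true ∧ (vis.set x.toNat true).getD j false = false)) := by
      ext j
      simp only [Finset.mem_filter, Finset.mem_range, Finset.mem_insert, hlen]
      constructor
      · rintro ⟨hj, h1, h2⟩
        by_cases hjx : j = x.toNat
        · exact Or.inl hjx
        · exact Or.inr ⟨hj, h1, by rw [getD_set_ne vis _ _ hjx]; exact h2⟩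
      · rintro (rfl | ⟨hj, h1, h2⟩)
        · exact ⟨h.2, hSx, hvfalse⟩
        · by_cases hjx : j = x.toNat
          · subst hjx
            rw [getD_set_self vis _ h.2] at h2
            exact Bool.noConfusion h2
          · exact ⟨hj, h1, by rw [getD_set_ne vis _ _ hjx] at h2; exact h2⟩
    have hnotmem : x.toNat ∉ ((Finset.range (vis.set x.toNat true).length).filter (fun j =>
        rF.getD j false = true ∧ (vis.set x.toNat true).getD j false = false)) := by
      simp only [Finset.mem_filter, Finset.mem_range]
      rintro ⟨_, _, h2⟩
      rw [getD_set_self vis _ h.2] at h2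
      exact Bool.noConfusion h2
    rw [hset, Finset.card_insert_of_notMem hnotmem]
    push_cast
    ring
  | case4 x rest vis size uniq h ih =>
    rw [dfsLoop_oor g initial x rest vis size uniq h]
    exact ih

theorem dfs_uniq (g : List (List Int)) (initial : List Int) (stack : List Int)
    (vis : List Bool) (size uniq : Int) :
    ∃ E : List Int, (∀ t ∈ E, 0 ≤ t) ∧
      (dfsLoop g initial stack vis size uniq).2.2 = uniqList uniq E ∧
      (∀ t, t ∈ E ↔ ∃ u, vis.getD u false = false ∧
        (dfsLoop g initial stack vis size uniq).1.getD u false = true ∧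
        ∃ k, k < (g.getD u []).length ∧ (g.getD u []).getD k 0 ≠ 0 ∧ (k : Int) ∈ initial ∧
          t = (k : Int)) := by
  induction stack, vis, size, uniq using dfsLoop.induct g initial with
  | case1 vis size uniq =>
    refine ⟨[], by simp, by rw [dfsLoop_nil]; rfl, ?_⟩
    intro t
    simp only [List.not_mem_nil, false_iff]
    rintro ⟨u, hu1, hu2, -⟩
    rw [dfsLoop_nil] at hu2
    have h2 : vis.getD u false = true := hu2
    rw [h2] at hu1
    exact Bool.noConfusion hu1
  | case2 x rest vis size uniq h hv ih =>
    rcases ih with ⟨E, hE1, hE2, hE3⟩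
    refine ⟨E, hE1, ?_, ?_⟩
    · rw [dfsLoop_seen g initial x rest vis size uniq h hv]; exact hE2
    · intro t
      rw [dfsLoop_seen g initial x rest vis size uniq h hv]
      exact hE3 t
  | case3 x rest vis size uniq h hv ps uniq' hscan ih =>
    rcases ih with ⟨E, hE1, hE2, hE3⟩
    have hvfalse : vis.getD x.toNat false = false := by
      cases hvv : vis.getD x.toNat false
      · rfl
      · exact absurd hvv hv
    refine ⟨rowInf initial (g.getD x.toNat []) 0 ++ E, ?_, ?_, ?_⟩
    · intro t ht
      rcases List.mem_append.mp ht with h1 | h1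
      · rcases (mem_rowInf initial _ 0 t).mp h1 with ⟨k, -, -, -, -, rfl⟩
        positivity
      · exact hE1 t h1
    · rw [dfsLoop_new g initial x rest vis size uniq h hv ps uniq' hscan]
      rw [hE2, uniqList_append]
      have : uniq' = uniqList uniq (rowInf initial (g.getD x.toNat []) 0) := by
        have := scanRow_snd initial (vis.set x.toNat true) (g.getD x.toNat []) 0 uniq
        rw [hscan] at this
        exact this
      rw [this]
    · intro t
      rw [dfsLoop_new g initial x rest vis size uniq h hv ps uniq' hscan]
      set rF := (dfsLoop g initial (ps.reverse ++ rest) (vis.set x.toNat true) (size + 1) uniq').1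
        with hrF
      have hSx : rF.getD x.toNat false = true :=
        dfs_mono g initial _ _ _ _ x.toNat (getD_set_self vis _ h.2)
      rw [List.mem_append]
      constructor
      · rintro (h1 | h1)
        · rcases (mem_rowInf initial _ 0 t).mp h1 with ⟨k, -, hk2, hk3, hk4, hk5⟩
          exact ⟨x.toNat, hvfalse, hSx, k, by simpa using hk2, by simpa using hk3, hk4, hk5⟩
        · rcases (hE3 t).mp h1 with ⟨u, hu1, hu2, hu3⟩
          have hux : u ≠ x.toNat := by
            intro huu
            subst huu
            rw [getD_set_self vis _ h.2] at hu1
            exact Bool.noConfusion hu1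
          rw [getD_set_ne vis _ _ hux] at hu1
          exact ⟨u, hu1, hu2, hu3⟩
      · rintro ⟨u, hu1, hu2, k, hk1, hk2, hk3, hk4⟩
        by_cases hux : u = x.toNat
        · subst hux
          left
          exact (mem_rowInf initial _ 0 t).mpr ⟨k, Nat.zero_le _, by simpa using hk1,
            by simpa using hk2, hk3, hk4⟩
        · right
          refine (hE3 t).mpr ⟨u, ?_, hu2, k, hk1, hk2, hk3, hk4⟩
          rw [getD_set_ne vis _ _ hux]
          exact hu1
  | case4 x rest vis size uniq h ih =>
    rcases ih with ⟨E, hE1, hE2, hE3⟩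
    refine ⟨E, hE1, ?_, ?_⟩
    · rw [dfsLoop_oor g initial x rest vis size uniq h]; exact hE2
    · intro t
      rw [dfsLoop_oor g initial x rest vis size uniq h]
      exact hE3 t

-- ---------- B-side specs ----------
theorem mem_newRow (initial : List Int) (assigned : List Bool) (comp : List Int)
    (row : List Int) (j : Nat) (acc : List Int) (x : Int) :
    x ∈ newRow initial assigned comp row j acc ↔ x ∈ acc ∨
      ∃ k, j ≤ k ∧ k < j + row.length ∧ row.getD (k - j) 0 ≠ 0 ∧ (k : Int) ∉ initial ∧
        k < assigned.length ∧ assigned.getD k false = false ∧ (k : Int) ∉ comp ∧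
        x = (k : Int) := by
  induction row generalizing j acc with
  | nil => simp [newRow]
  | cons c rest ih =>
    simp only [newRow]
    have tail : ∀ k, j + 1 ≤ k → (c :: rest).getD (k - j) 0 = rest.getD (k - (j + 1)) 0 := by
      intro k hk
      have : k - j = (k - (j + 1)) + 1 := by omega
      rw [this]; rfl
    split_ifs with h1
    · rw [ih]
      rw [PySem.Set.mem_add]
      constructor
      · rintro ((hx | hx) | ⟨k, hk1, hk2, hk3, hk4, hk5, hk6, hk7, hk8⟩)
        · exact Or.inl hx
        · exact Or.inr ⟨j, le_refl _, by simp, by simpa using h1.1, h1.2.1, h1.2.2.1,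
            h1.2.2.2.1, h1.2.2.2.2, hx⟩
        · exact Or.inr ⟨k, by omega, by simp; omega, by rw [tail k hk1]; exact hk3,
            hk4, hk5, hk6, hk7, hk8⟩
      · rintro (hx | ⟨k, hk1, hk2, hk3, hk4, hk5, hk6, hk7, hk8⟩)
        · exact Or.inl (Or.inl hx)
        · rcases Nat.eq_or_lt_of_le hk1 with h | h
          · exact Or.inl (Or.inr (by rw [hk8, h]))
          · exact Or.inr ⟨k, by omega, by simp at hk2; omega,
              by rw [tail k (by omega)] at hk3; exact hk3, hk4, hk5, hk6, hk7, hk8⟩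
    · rw [ih]
      rw [Classical.not_and_iff_not_or_not, Classical.not_and_iff_not_or_not,
        Classical.not_and_iff_not_or_not, Classical.not_and_iff_not_or_not] at h1
      constructor
      · rintro (hx | ⟨k, hk1, hk2, hk3, hk4, hk5, hk6, hk7, hk8⟩)
        · exact Or.inl hx
        · exact Or.inr ⟨k, by omega, by simp; omega, by rw [tail k hk1]; exact hk3,
            hk4, hk5, hk6, hk7, hk8⟩
      · rintro (hx | ⟨k, hk1, hk2, hk3, hk4, hk5, hk6, hk7, hk8⟩)
        · exact Or.inl hx
        · rcases Nat.eq_or_lt_of_le hk1 with h | h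
          · exfalso
            subst h
            simp only [Nat.sub_self] at hk3
            rcases h1 with h' | h' | h' | h' | h'
            · exact h' (by simpa using hk3)
            · exact h' hk4
            · exact h' hk5
            · exact h' hk6
            · exact h' hk7
          · exact Or.inr ⟨k, by omega, by simp at hk2; omega,
              by rw [tail k (by omega)] at hk3; exact hk3, hk4, hk5, hk6, hk7, hk8⟩

theorem nodup_newRow (initial : List Int) (assigned : List Bool) (comp : List Int)
    (row : List Int) (j : Nat) (acc : List Int) (hacc : acc.Nodup) :
    (newRow initial assigned comp row j acc).Nodup := by
  induction row generalizing j acc with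
  | nil => exact hacc
  | cons c rest ih =>
    simp only [newRow]
    split_ifs with h1
    · exact ih _ _ (PySem.Set.nodup_add acc _ hacc)
    · exact ih _ _ hacc

theorem mem_stepNew (g : List (List Int)) (initial : List Int) (assigned : List Bool)
    (comp : List Int) (x : Int) :
    x ∈ stepNew g initial assigned comp ↔
      ∃ u ∈ comp, ∃ k, k < (g.getD u.toNat []).length ∧ (g.getD u.toNat []).getD k 0 ≠ 0 ∧
        (k : Int) ∉ initial ∧ k < assigned.length ∧ assigned.getD k false = false ∧
        (k : Int) ∉ comp ∧ x = (k : Int) := by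
  unfold stepNew
  have main : ∀ (l : List Int) (acc : List Int),
      x ∈ l.foldl (fun acc u => newRow initial assigned comp (g.getD u.toNat []) 0 acc) acc ↔
        x ∈ acc ∨ ∃ u ∈ l, ∃ k, k < (g.getD u.toNat []).length ∧
          (g.getD u.toNat []).getD k 0 ≠ 0 ∧ (k : Int) ∉ initial ∧ k < assigned.length ∧
          assigned.getD k false = false ∧ (k : Int) ∉ comp ∧ x = (k : Int) := by
    intro l
    induction l with
    | nil => simp
    | cons u rest ih =>
      intro acc
      simp only [List.foldl_cons, ih, mem_newRow]
      constructor
      · rintro ((hx | ⟨k, hk1, hk2, hk3, hk4, hk5, hk6, hk7, hk8⟩) | ⟨v, hv, hrest⟩)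
        · exact Or.inl hx
        · exact Or.inr ⟨u, by simp, k, by simpa using hk2, by simpa using hk3, hk4, hk5, hk6,
            hk7, hk8⟩
        · exact Or.inr ⟨v, by simp [hv], hrest⟩
      · rintro (hx | ⟨v, hv, hrest⟩)
        · exact Or.inl (Or.inl hx)
        · rcases List.mem_cons.mp hv with rfl | hv'
          · rcases hrest with ⟨k, hk1, hk2, hk3, hk4, hk5, hk6, hk7⟩
            exact Or.inl (Or.inr ⟨k, by omega, by simpa using hk1, by simpa using hk2, hk3,
              hk4, hk5, hk6, hk7⟩)
          · exact Or.inr ⟨v, hv', hrest⟩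
  rw [main comp []]
  simp

theorem nodup_stepNew (g : List (List Int)) (initial : List Int) (assigned : List Bool)
    (comp : List Int) : (stepNew g initial assigned comp).Nodup := by
  unfold stepNew
  have main : ∀ (l : List Int) (acc : List Int), acc.Nodup →
      (l.foldl (fun acc u => newRow initial assigned comp (g.getD u.toNat []) 0 acc) acc).Nodup := by
    intro l
    induction l with
    | nil => exact fun acc h => h
    | cons u rest ih => exact fun acc h => ih _ (nodup_newRow _ _ _ _ _ _ h)
  exact main comp [] (by simp)

theorem mem_touchRow (initial : List Int) (row : List Int) (j : Nat) (acc : List Int) (x : Int) :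
    x ∈ touchRow initial row j acc ↔ x ∈ acc ∨
      ∃ k, j ≤ k ∧ k < j + row.length ∧ row.getD (k - j) 0 ≠ 0 ∧ (k : Int) ∈ initial ∧
        x = (k : Int) := by
  induction row generalizing j acc with
  | nil => simp [touchRow]
  | cons c rest ih =>
    simp only [touchRow]
    have tail : ∀ k, j + 1 ≤ k → (c :: rest).getD (k - j) 0 = rest.getD (k - (j + 1)) 0 := by
      intro k hk
      have : k - j = (k - (j + 1)) + 1 := by omega
      rw [this]; rfl
    split_ifs with h1
    · rw [ih, PySem.Set.mem_add]
      constructor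
      · rintro ((hx | hx) | ⟨k, hk1, hk2, hk3, hk4, hk5⟩)
        · exact Or.inl hx
        · exact Or.inr ⟨j, le_refl _, by simp, by simpa using h1.1, h1.2, hx⟩
        · exact Or.inr ⟨k, by omega, by simp; omega, by rw [tail k hk1]; exact hk3, hk4, hk5⟩
      · rintro (hx | ⟨k, hk1, hk2, hk3, hk4, hk5⟩)
        · exact Or.inl (Or.inl hx)
        · rcases Nat.eq_or_lt_of_le hk1 with h | h
          · exact Or.inl (Or.inr (by rw [hk5, h]))
          · exact Or.inr ⟨k, by omega, by simp at hk2; omega,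
              by rw [tail k (by omega)] at hk3; exact hk3, hk4, hk5⟩
    · rw [ih]
      rw [Classical.not_and_iff_not_or_not] at h1
      constructor
      · rintro (hx | ⟨k, hk1, hk2, hk3, hk4, hk5⟩)
        · exact Or.inl hx
        · exact Or.inr ⟨k, by omega, by simp; omega, by rw [tail k hk1]; exact hk3, hk4, hk5⟩
      · rintro (hx | ⟨k, hk1, hk2, hk3, hk4, hk5⟩)
        · exact Or.inl hx
        · rcases Nat.eq_or_lt_of_le hk1 with h | h
          · exfalso
            subst h
            simp only [Nat.sub_self] at hk3
            rcases h1 with h' | h'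
            · exact h' (by simpa using hk3)
            · exact h' hk4
          · exact Or.inr ⟨k, by omega, by simp at hk2; omega,
              by rw [tail k (by omega)] at hk3; exact hk3, hk4, hk5⟩

theorem nodup_touchRow (initial : List Int) (row : List Int) (j : Nat) (acc : List Int)
    (hacc : acc.Nodup) : (touchRow initial row j acc).Nodup := by
  induction row generalizing j acc with
  | nil => exact hacc
  | cons c rest ih =>
    simp only [touchRow]
    split_ifs with h1
    · exact ih _ _ (PySem.Set.nodup_add acc _ hacc)
    · exact ih _ _ hacc

theorem mem_touchOf (g : List (List Int)) (initial : List Int) (comp : List Int) (x : Int) :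
    x ∈ touchOf g initial comp ↔
      ∃ u ∈ comp, ∃ k, k < (g.getD u.toNat []).length ∧ (g.getD u.toNat []).getD k 0 ≠ 0 ∧
        (k : Int) ∈ initial ∧ x = (k : Int) := by
  unfold touchOf
  have main : ∀ (l : List Int) (acc : List Int),
      x ∈ l.foldl (fun acc u => touchRow initial (g.getD u.toNat []) 0 acc) acc ↔
        x ∈ acc ∨ ∃ u ∈ l, ∃ k, k < (g.getD u.toNat []).length ∧
          (g.getD u.toNat []).getD k 0 ≠ 0 ∧ (k : Int) ∈ initial ∧ x = (k : Int) := by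
    intro l
    induction l with
    | nil => simp
    | cons u rest ih =>
      intro acc
      simp only [List.foldl_cons, ih, mem_touchRow]
      constructor
      · rintro ((hx | ⟨k, hk1, hk2, hk3, hk4, hk5⟩) | ⟨v, hv, hrest⟩)
        · exact Or.inl hx
        · exact Or.inr ⟨u, by simp, k, by simpa using hk2, by simpa using hk3, hk4, hk5⟩
        · exact Or.inr ⟨v, by simp [hv], hrest⟩
      · rintro (hx | ⟨v, hv, hrest⟩)
        · exact Or.inl (Or.inl hx)
        · rcases List.mem_cons.mp hv with rfl | hv'
          · rcases hrest with ⟨k, hk1, hk2, hk3, hk4⟩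
            exact Or.inl (Or.inr ⟨k, by omega, by simpa using hk1, by simpa using hk2, hk3, hk4⟩)
          · exact Or.inr ⟨v, hv', hrest⟩
  rw [main comp []]
  simp

theorem nodup_touchOf (g : List (List Int)) (initial : List Int) (comp : List Int) :
    (touchOf g initial comp).Nodup := by
  unfold touchOf
  have main : ∀ (l : List Int) (acc : List Int), acc.Nodup →
      (l.foldl (fun acc u => touchRow initial (g.getD u.toNat []) 0 acc) acc).Nodup := by
    intro l
    induction l with
    | nil => exact fun acc h => h
    | cons u rest ih => exact fun acc h => ih _ (nodup_touchRow _ _ _ _ h)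
  exact main comp [] (by simp)

-- ---------- closureLoop lemmas ----------
theorem cl_mono (g : List (List Int)) (initial : List Int) (assigned : List Bool)
    (fuel : Nat) (comp : List Int) (x : Int) (hx : x ∈ comp) :
    x ∈ closureLoop g initial assigned fuel comp := by
  induction fuel generalizing comp with
  | zero => exact hx
  | succ fuel ih =>
    simp only [closureLoop]
    split_ifs with h
    · exact hx
    · exact ih _ ((PySem.Set.mem_union comp _ x).mpr (Or.inl hx))

theorem cl_nodup (g : List (List Int)) (initial : List Int) (assigned : List Bool)
    (fuel : Nat) (comp : List Int) (hc : comp.Nodup) :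
    (closureLoop g initial assigned fuel comp).Nodup := by
  induction fuel generalizing comp with
  | zero => exact hc
  | succ fuel ih =>
    simp only [closureLoop]
    split_ifs with h
    · exact hc
    · exact ih _ (PySem.Set.nodup_union comp _ hc)

theorem cl_sound (g : List (List Int)) (initial : List Int) (assigned : List Bool)
    (fuel : Nat) (comp : List Int) (Good : Int → Prop)
    (hbase : ∀ x ∈ comp, Good x)
    (hstep : ∀ u x, Good u → (∃ k, k < (g.getD u.toNat []).length ∧
      (g.getD u.toNat []).getD k 0 ≠ 0 ∧ (k : Int) ∉ initial ∧ k < assigned.length ∧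
      assigned.getD k false = false ∧ x = (k : Int)) → Good x) :
    ∀ x ∈ closureLoop g initial assigned fuel comp, Good x := by
  induction fuel generalizing comp with
  | zero => exact hbase
  | succ fuel ih =>
    simp only [closureLoop]
    split_ifs with h
    · exact hbase
    · refine ih _ ?_
      intro x hx
      rcases (PySem.Set.mem_union comp _ x).mp hx with hx | hx
      · exact hbase x hx
      · rcases (mem_stepNew g initial assigned comp x).mp hx with
          ⟨u, hu, k, hk1, hk2, hk3, hk4, hk5, hk6, hk7⟩
        exact hstep u x (hbase u hu) ⟨k, hk1, hk2, hk3, hk4, hk5, hk7⟩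

theorem nodup_int_length_le (L : List Int) (n : Nat) (hnod : L.Nodup)
    (hrange : ∀ x ∈ L, 0 ≤ x ∧ x.toNat < n) : L.length ≤ n := by
  have hmap : (L.map Int.toNat).Nodup := by
    refine List.Nodup.map_on ?_ hnod
    intro x hx y hy hxy
    have hx' := hrange x hx
    have hy' := hrange y hy
    omega
  have hsub : (L.map Int.toNat).toFinset ⊆ Finset.range n := by
    intro k hk
    simp only [List.mem_toFinset, List.mem_map] at hk
    rcases hk with ⟨x, hx, rfl⟩
    simp only [Finset.mem_range]
    exact (hrange x hx).2
  have := Finset.card_le_card hsub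
  rw [List.toFinset_card_of_nodup hmap, Finset.card_range, List.length_map] at this
  exact this

theorem cl_closed (g : List (List Int)) (initial : List Int) (assigned : List Bool)
    (fuel : Nat) (comp : List Int) (hnodup : comp.Nodup)
    (hrange : ∀ x ∈ comp, 0 ≤ x ∧ x.toNat < assigned.length)
    (hfuel : assigned.length + 1 ≤ comp.length + fuel) :
    ∀ u ∈ closureLoop g initial assigned fuel comp, ∀ k,
      k < (g.getD u.toNat []).length → (g.getD u.toNat []).getD k 0 ≠ 0 →
      (k : Int) ∉ initial → k < assigned.length → assigned.getD k false = false →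
      (k : Int) ∈ closureLoop g initial assigned fuel comp := by
  induction fuel generalizing comp with
  | zero =>
    exfalso
    have := nodup_int_length_le comp assigned.length hnodup hrange
    omega
  | succ fuel ih =>
    simp only [closureLoop]
    split_ifs with h
    · intro u hu k hk1 hk2 hk3 hk4 hk5
      by_cases hkc : (k : Int) ∈ comp
      · exact hkc
      · exfalso
        have : (k : Int) ∈ stepNew g initial assigned comp :=
          (mem_stepNew g initial assigned comp (k : Int)).mpr
            ⟨u, hu, k, hk1, hk2, hk3, hk4, hk5, hkc, rfl⟩
        rw [h] at this
        simp at this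
    · have hnw : ∀ x ∈ stepNew g initial assigned comp, x ∉ comp := by
        intro x hx
        rcases (mem_stepNew g initial assigned comp x).mp hx with
          ⟨u, hu, k, hk1, hk2, hk3, hk4, hk5, hk6, rfl⟩
        exact hk6
      have happ : PySem.Set.update comp (stepNew g initial assigned comp) =
          comp ++ stepNew g initial assigned comp :=
        PySem.Set.update_eq_append_of_disjoint comp _ (nodup_stepNew g initial assigned comp) hnw
      have hnodup' : (PySem.Set.union comp (stepNew g initial assigned comp)).Nodup :=
        PySem.Set.nodup_union comp _ hnodup
      have hrange' : ∀ x ∈ PySem.Set.union comp (stepNew g initial assigned comp),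
          0 ≤ x ∧ x.toNat < assigned.length := by
        intro x hx
        rcases (PySem.Set.mem_union comp _ x).mp hx with hx | hx
        · exact hrange x hx
        · rcases (mem_stepNew g initial assigned comp x).mp hx with
            ⟨u, hu, k, hk1, hk2, hk3, hk4, hk5, hk6, rfl⟩
          constructor
          · positivity
          · simpa using hk4
      have hlen : (PySem.Set.union comp (stepNew g initial assigned comp)).length =
          comp.length + (stepNew g initial assigned comp).length := by
        show (PySem.Set.update comp (stepNew g initial assigned comp)).length = _
        rw [happ, List.length_append]
      have hpos : 1 ≤ (stepNew g initial assigned comp).length := by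
        rcases List.exists_mem_of_ne_nil _ h with ⟨x, hx⟩
        exact List.length_pos_of_mem hx
    -- wait: need nonempty; h : ¬ stepNew = []
      exact ih _ hnodup' hrange' (by omega)

-- ---------- assignComp ----------
theorem length_assignComp (assigned : List Bool) (comp : List Int) :
    (assignComp assigned comp).length = assigned.length := by
  unfold assignComp
  induction comp generalizing assigned with
  | nil => rfl
  | cons u rest ih => simp [ih]

theorem getD_assignComp (assigned : List Bool) (comp : List Int)
    (hcomp : ∀ u ∈ comp, 0 ≤ u ∧ u.toNat < assigned.length) (j : Nat) :
    ((assignComp assigned comp).getD j false = true ↔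
      assigned.getD j false = true ∨ (j : Int) ∈ comp) := by
  unfold assignComp
  induction comp generalizing assigned with
  | nil => simp
  | cons u rest ih =>
    simp only [List.foldl_cons]
    have hu := hcomp u (by simp)
    have hrest : ∀ v ∈ rest, 0 ≤ v ∧ v.toNat < (assigned.set u.toNat true).length := by
      intro v hv
      simpa using hcomp v (by simp [hv])
    rw [ih _ hrest]
    constructor
    · rintro (h1 | h1)
      · by_cases hju : j = u.toNat
        · subst hju
          exact Or.inr (by simp [List.mem_cons]; left; omega)
        · rw [getD_set_ne assigned _ _ hju] at h1
          exact Or.inl h1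
      · exact Or.inr (by simp [h1])
    · rintro (h1 | h1)
      · left
        by_cases hju : j = u.toNat
        · subst hju; exact getD_set_self assigned _ hu.2
        · rwa [getD_set_ne assigned _ _ hju]
      · rcases List.mem_cons.mp h1 with h2 | h2
        · left
          have : j = u.toNat := by omega
          subst this
          exact getD_set_self assigned _ hu.2
        · exact Or.inr h2

-- ---------- the component lemma ----------
theorem componentEq (g : List (List Int)) (initial : List Int)
    (vis : List Bool) (hlen : vis.length = g.length)
    (i : Nat) (hi : i < g.length) (hvi : vis.getD i false = false)
    (hii : (i : Int) ∉ initial) :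
    (dfsLoop g initial [(i : Int)] vis 0 (-1)).1 =
        assignComp vis (closureLoop g initial vis g.length [(i : Int)]) ∧
    (dfsLoop g initial [(i : Int)] vis 0 (-1)).2.1 =
        ((closureLoop g initial vis g.length [(i : Int)]).length : Int) ∧
    (∀ t, touchOf g initial (closureLoop g initial vis g.length [(i : Int)]) = [t] →
        (dfsLoop g initial [(i : Int)] vis 0 (-1)).2.2 = t ∧ 0 ≤ t) ∧
    (touchOf g initial (closureLoop g initial vis g.length [(i : Int)]) = [] →
        (dfsLoop g initial [(i : Int)] vis 0 (-1)).2.2 = -1) ∧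
    (∀ a b rest, touchOf g initial (closureLoop g initial vis g.length [(i : Int)]) =
        a :: b :: rest → (dfsLoop g initial [(i : Int)] vis 0 (-1)).2.2 = -2) := by
  set comp := closureLoop g initial vis g.length [(i : Int)] with hcomp
  set r := dfsLoop g initial [(i : Int)] vis 0 (-1) with hr
  have hitoNat : ((i : Int)).toNat = i := by simp
  -- basic facts about comp
  have hbase : ∀ x ∈ [(i : Int)], 0 ≤ x ∧ x.toNat < vis.length ∧ x ∉ initial ∧
      vis.getD x.toNat false = false := by
    intro x hx
    rcases List.mem_singleton.mp hx with rfl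
    exact ⟨by positivity, by rw [hitoNat]; omega, hii, by rwa [hitoNat]⟩
  have hgood : ∀ x ∈ comp, 0 ≤ x ∧ x.toNat < vis.length ∧ x ∉ initial ∧
      vis.getD x.toNat false = false := by
    refine cl_sound g initial vis g.length [(i : Int)] _ hbase ?_
    rintro u x hGu ⟨k, hk1, hk2, hk3, hk4, hk5, rfl⟩
    exact ⟨by positivity, by simpa using hk4, hk3, by simpa using hk5⟩
  have hnodup : comp.Nodup := cl_nodup g initial vis g.length _ (by simp)
  have hclosed : ∀ u ∈ comp, ∀ k, k < (g.getD u.toNat []).length →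
      (g.getD u.toNat []).getD k 0 ≠ 0 → (k : Int) ∉ initial → k < vis.length →
      vis.getD k false = false → (k : Int) ∈ comp := by
    refine cl_closed g initial vis g.length [(i : Int)] (by simp) ?_ (by simp; omega)
    intro x hx
    rcases List.mem_singleton.mp hx with rfl
    exact ⟨by positivity, by rw [hitoNat]; omega⟩
  have hicomp : (i : Int) ∈ comp := cl_mono g initial vis g.length _ _ (by simp)
  -- newly visited ↔ in comp
  have hnewly_comp : ∀ j : Nat, r.1.getD j false = true → vis.getD j false = false →
      (j : Int) ∈ comp := by
    intro j hj1 hj2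
    have := dfs_sound g initial [(i : Int)] vis 0 (-1)
      (fun u => (u : Int) ∈ comp) (fun j => vis.getD j false = true)
      (by
        intro u k hCu hk1 hk2 hk3 hk4 hk5
        have hk5' : vis.getD k false = false := by
          cases hkk : vis.getD k false
          · rfl
          · exact absurd hkk hk5
        have := hclosed (u : Int) (by simpa using hCu) k (by simpa using hk1)
          (by simpa using hk2) hk3 hk4 hk5'
        simpa using this)
      (fun j hj => Or.inl hj) (fun j hj => hj)
      (by
        intro x hx
        rcases List.mem_singleton.mp hx with rfl
        exact ⟨by positivity, by rw [hitoNat]; exact hicomp⟩)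
      j hj1
    rcases this with h | h
    · rw [h] at hj2; exact Bool.noConfusion hj2
    · exact h
  have hcomp_newly : ∀ x ∈ comp, r.1.getD x.toNat false = true ∧
      vis.getD x.toNat false = false := by
    refine cl_sound g initial vis g.length [(i : Int)] _ ?_ ?_
    · intro x hx
      rcases List.mem_singleton.mp hx with rfl
      rw [hitoNat]
      constructor
      · exact dfs_stack g initial _ _ _ _ (i : Int) (by simp) (by positivity)
          (by rw [hitoNat]; omega)
      · exact hvi
    · rintro u x ⟨hGu1, hGu2⟩ ⟨k, hk1, hk2, hk3, hk4, hk5, rfl⟩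
      have hk5' : vis.getD k false = false := hk5
      constructor
      · have := dfs_closed g initial [(i : Int)] vis 0 (-1) u.toNat k hGu2 hGu1
          hk1 hk2 hk3 hk4
        simpa using this
      · simpa using hk5'
  -- (1) final vis = assignComp
  have hrange : ∀ u ∈ comp, 0 ≤ u ∧ u.toNat < vis.length :=
    fun u hu => ⟨(hgood u hu).1, (hgood u hu).2.1⟩
  have hvisEq : r.1 = assignComp vis comp := by
    apply List.ext_getElem
    · rw [dfs_len, length_assignComp]
    · intro j h1 h2
      have hj : j < vis.length := by
        have := dfs_len g initial [(i : Int)] vis 0 (-1)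
        rw [← hr] at this
        omega
      have hgetD : r.1.getD j false = (assignComp vis comp).getD j false := by
        have hiff : r.1.getD j false = true ↔ (assignComp vis comp).getD j false = true := by
          rw [getD_assignComp vis comp hrange j]
          constructor
          · intro h
            cases hvj : vis.getD j false
            · exact Or.inr (hnewly_comp j h hvj)
            · exact Or.inl rfl
          · rintro (h | h)
            · exact dfs_mono g initial _ _ _ _ j h
            · have := (hcomp_newly _ h).1
              simpa using this
        exact Bool.eq_iff_iff.mpr hiff
      rw [List.getD_eq_getElem r.1 false (by omega), List.getD_eq_getElem _ false (by omega)]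
        at hgetD
      exact hgetD
  -- (2) size
  have hsize : r.2.1 = (comp.length : Int) := by
    have hs := dfs_size g initial [(i : Int)] vis 0 (-1)
    rw [← hr] at hs
    have hSeq : ((Finset.range vis.length).filter (fun j =>
        r.1.getD j false = true ∧ vis.getD j false = false)) =
        (comp.map Int.toNat).toFinset := by
      ext k
      simp only [Finset.mem_filter, Finset.mem_range, List.mem_toFinset, List.mem_map]
      constructor
      · rintro ⟨hk, h1, h2⟩
        exact ⟨(k : Int), hnewly_comp k h1 h2, by simp⟩
      · rintro ⟨x, hx, rfl⟩
        have hg := hgood x hx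
        have hn := hcomp_newly x hx
        exact ⟨hg.2.1, hn.1, hn.2⟩
    have hmapnodup : (comp.map Int.toNat).Nodup := by
      refine List.Nodup.map_on ?_ hnodup
      intro x hx y hy hxy
      have hx' := (hgood x hx).1
      have hy' := (hgood y hy).1
      omega
    rw [hSeq, List.toFinset_card_of_nodup hmapnodup, List.length_map] at hs
    rw [hs]
    ring
  -- (3) uniq classification
  rcases dfs_uniq g initial [(i : Int)] vis 0 (-1) with ⟨E, hE1, hE2, hE3⟩
  rw [← hr] at hE2 hE3
  have hEtouch : ∀ t, t ∈ E ↔ t ∈ touchOf g initial comp := by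
    intro t
    rw [hE3 t, mem_touchOf]
    constructor
    · rintro ⟨u, hu1, hu2, k, hk1, hk2, hk3, hk4⟩
      have humem : (u : Int) ∈ comp := hnewly_comp u hu2 hu1
      exact ⟨(u : Int), humem, k, by simpa using hk1, by simpa using hk2, hk3, hk4⟩
    · rintro ⟨u, hu, k, hk1, hk2, hk3, hk4⟩
      have hn := hcomp_newly u hu
      exact ⟨u.toNat, hn.2, hn.1, k, hk1, hk2, hk3, hk4⟩
  have htnodup : (touchOf g initial comp).Nodup := nodup_touchOf g initial comp
  refine ⟨hvisEq, hsize, ?_, ?_, ?_⟩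
  · intro t ht
    have htE : t ∈ E := (hEtouch t).mpr (by simp [ht])
    have ht0 : 0 ≤ t := hE1 t htE
    refine ⟨?_, ht0⟩
    rw [hE2]
    refine uniqList_single t ht0 E (by intro h; rw [h] at htE; exact absurd htE (by simp)) ?_
    intro x hx
    have := (hEtouch x).mp hx
    rw [ht] at this
    simpa using this
  · intro ht
    have hEnil : E = [] := by
      cases hE : E with
      | nil => rfl
      | cons a rest =>
        exfalso
        have : a ∈ touchOf g initial comp := (hEtouch a).mp (by simp [hE])
        rw [ht] at this
        simp at this
    rw [hE2, hEnil]
    rfl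
  · intro a b rest ht
    have hab : a ≠ b := by
      rw [ht] at htnodup
      exact (List.nodup_cons.mp htnodup).1 ∘ (by intro h; simp [h])
    have haE : a ∈ E := (hEtouch a).mpr (by simp [ht])
    have hbE : b ∈ E := (hEtouch b).mpr (by simp [ht])
    rw [hE2]
    exact uniqList_two_distinct E hE1 ⟨a, haE, b, hbE, hab⟩

-- ---------- outer loop equivalence ----------
theorem outer_fold_eq (g : List (List Int)) (initial : List Int) :
    ∀ (l : List Int), (∀ x ∈ l, 0 ≤ x ∧ x.toNat < g.length) →
    ∀ (vis : List Bool) (cnt : PySem.Dict Int Int), vis.length = g.length →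
      l.foldl (fun s i =>
        if s.1.getD i.toNat false = false ∧ i ∉ initial then
          match dfsLoop g initial [i] s.1 0 (-1) with
          | (vis', size, uniq) =>
            if uniq ≥ 0 then (vis', s.2.modify uniq 0 (· + size)) else (vis', s.2)
        else s) (vis, cnt) =
      l.foldl (fun s i =>
        if i ∈ initial ∨ s.1.getD i.toNat false then s
        else
          let comp := closureLoop g initial s.1 g.length [i]
          let saved :=
            match touchOf g initial comp with
            | [t] => s.2.insert t (s.2.getD t 0 + (comp.length : Int))
            | _ => s.2
          (assignComp s.1 comp, saved)) (vis, cnt) := by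
  intro l
  induction l with
  | nil => intro _ vis cnt _; rfl
  | cons i rest ih =>
    intro hmem vis cnt hvis
    have hi := hmem i (by simp)
    simp only [List.foldl_cons]
    by_cases hcond : vis.getD i.toNat false = false ∧ i ∉ initial
    · have hB : ¬(i ∈ initial ∨ vis.getD i.toNat false = true) := by
        rintro (h | h)
        · exact hcond.2 h
        · rw [hcond.1] at h; exact Bool.noConfusion h
      rw [if_neg hB, if_pos hcond]
      have hieq : i = ((i.toNat : Nat) : Int) := by omega
      have hC := componentEq g initial vis hvis i.toNat hi.2
        hcond.1 (by rw [← hieq]; exact hcond.2)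
      rw [← hieq] at hC
      rcases hC with ⟨h1, h2, h3, h4, h5⟩
      have hstep : (if (dfsLoop g initial [i] vis 0 (-1)).2.2 ≥ 0 then
            ((dfsLoop g initial [i] vis 0 (-1)).1,
              cnt.modify ((dfsLoop g initial [i] vis 0 (-1)).2.2) 0
                (· + (dfsLoop g initial [i] vis 0 (-1)).2.1))
          else ((dfsLoop g initial [i] vis 0 (-1)).1, cnt)) =
          (assignComp vis (closureLoop g initial vis g.length [i]),
            match touchOf g initial (closureLoop g initial vis g.length [i]) with
            | [t] => cnt.insert t (cnt.getD t 0 + ((closureLoop g initial vis g.length [i]).length : Int))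
            | _ => cnt) := by
        rcases hd : dfsLoop g initial [i] vis 0 (-1) with ⟨dv, ds, du⟩
        rw [hd] at h1 h2 h3 h4 h5
        simp only at h1 h2 h3 h4 h5
        dsimp only
        cases htouch : touchOf g initial (closureLoop g initial vis g.length [i]) with
        | nil =>
          rw [h4 htouch, h1]
          norm_num
        | cons a tl =>
          cases tl with
          | nil =>
            rcases h3 a htouch with ⟨hu, ha0⟩
            rw [hu, h1, h2]
            simp only [ge_iff_le, if_pos (by omega : (0:Int) ≤ a)]
            rfl
          | cons b tl2 =>
            have hu := h5 a b tl2 htouch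
            rw [hu, h1]
            norm_num
      rw [hstep]
      refine ih (fun x hx => hmem x (by simp [hx])) _ _ ?_
      rw [length_assignComp]
      exact hvis
    · have hB : i ∈ initial ∨ vis.getD i.toNat false = true := by
        rw [Classical.not_and_iff_not_or_not] at hcond
        rcases hcond with h | h
        · right
          cases hv : vis.getD i.toNat false
          · exact absurd hv h
          · rfl
        · left
          by_contra hni
          exact h hni
      rw [if_neg (by simpa using hcond), if_pos (by simpa using hB)]
      exact ih (fun x hx => hmem x (by simp [hx])) _ _ hvis

-- ---------- final extraction ----------
theorem fold_minmax (rest : List (Int × Int)) :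
    ∀ (p : Int × Int),
      (rest.map (fun kv => (-kv.2, kv.1))).foldl
        (fun b q => if q.1 < b.1 ∨ (q.1 = b.1 ∧ q.2 < b.2) then q else b) (-p.2, p.1) =
      (-(rest.foldl (fun b q => if b.2 < q.2 ∨ (b.2 = q.2 ∧ q.1 < b.1) then q else b) p).2,
        (rest.foldl (fun b q => if b.2 < q.2 ∨ (b.2 = q.2 ∧ q.1 < b.1) then q else b) p).1) := by
  induction rest with
  | nil => intro p; rfl
  | cons q rest ih =>
    intro p
    simp only [List.map_cons, List.foldl_cons]
    have hcond : ((-q.2 : Int) < -p.2 ∨ (-q.2 = -p.2 ∧ q.1 < p.1)) ↔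
        (p.2 < q.2 ∨ (p.2 = q.2 ∧ q.1 < p.1)) := by
      constructor
      · rintro (h | ⟨h1, h2⟩)
        · exact Or.inl (by omega)
        · exact Or.inr ⟨by omega, h2⟩
      · rintro (h | ⟨h1, h2⟩)
        · exact Or.inl (by omega)
        · exact Or.inr ⟨by omega, h2⟩
    by_cases hc : p.2 < q.2 ∨ (p.2 = q.2 ∧ q.1 < p.1)
    · rw [if_pos (hcond.mpr hc), if_pos hc]
      exact ih q
    · rw [if_neg (fun h => hc (hcond.mp h)), if_neg hc]
      exact ih p

-- ---------- assembling the programs ----------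
theorem minMalware_eq (graph : List (List Int)) (initial : List Int) :
    minMalwareSpread graph initial = minMalwareSpread_alt graph initial := by
  have houter : outerA graph initial = outerB graph initial := by
    unfold outerA outerB
    refine outer_fold_eq graph initial _ ?_ _ _ (by simp)
    intro x hx
    rw [PySem.List.mem_pyRange_one] at hx
    omega
  show (match (outerA graph initial).2.items.map (fun kv => (-kv.2, kv.1)) with
    | [] => (PySem.List.min? initial (fun x => x)).getD 0
    | p :: rest =>
        (rest.foldl (fun (b q : Int × Int) =>
          if q.1 < b.1 ∨ (q.1 = b.1 ∧ q.2 < b.2) then q else b) p).2) =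
    (match (outerB graph initial).2.items with
    | [] => (PySem.List.min? initial (fun x => x)).getD 0
    | p :: rest =>
        (rest.foldl (fun (b q : Int × Int) =>
          if b.2 < q.2 ∨ (b.2 = q.2 ∧ q.1 < b.1) then q else b) p).1)
  rw [houter]
  cases hitems : (outerB graph initial).2.items with
  | nil => rfl
  | cons p rest =>
    simp only [List.map_cons]
    rw [fold_minmax]

-- ===== VERDICT (by name: the statement is the Claim_ definition above) =====
theorem minMalwareSpread_spec : Claim_equal_minMalwareSpread := by
  intro graph initial _hdom _hpre
  unfold Spec_minMalwareSpread
  exact minMalware_eq graph initial
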